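-- pv_equiv track=rewrite | github.com/Team12Coursework/Prototype | backend/tests/test_scrabble_algorithm.py | str_to_arr
-- ===== SOURCE A (Python) =====
-- BoardT = list[list[str | None]]
--
-- def str_to_arr(inp: str) -> BoardT:
--     """convert a 255 char string into a 15x15 array"""
--     out: BoardT = [[] for _ in range(15)]
--     row: int = 0
--     for i, char in enumerate(inp):
--         if (i > 0) and (i % 15 == 0):
--             row += 1
--         if char == '.':
--             out[row].append(None)
--         else:
--             out[row].append(char)
--     return out
-- ===== SOURCE B (Python) =====
-- def str_to_arr(inp: str) -> list:
--     """convert a 255 char string into a 15x15 array"""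
--     return [[None if c == '.' else c for c in inp[15 * k:15 * k + 15]]
--             for k in range(15)]
-- ===== Notes on version B (the rewrite author's own statement) =====
-- stated objective: simpler
-- what changed: Replaces A's single enumerate-loop with a mutable row counter and per-cell appends into a pre-built list of 15 empty rows by a direct construction: one comprehension per row over the 15 fixed slices inp[15*k:15*k+15].
import Mathlib
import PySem

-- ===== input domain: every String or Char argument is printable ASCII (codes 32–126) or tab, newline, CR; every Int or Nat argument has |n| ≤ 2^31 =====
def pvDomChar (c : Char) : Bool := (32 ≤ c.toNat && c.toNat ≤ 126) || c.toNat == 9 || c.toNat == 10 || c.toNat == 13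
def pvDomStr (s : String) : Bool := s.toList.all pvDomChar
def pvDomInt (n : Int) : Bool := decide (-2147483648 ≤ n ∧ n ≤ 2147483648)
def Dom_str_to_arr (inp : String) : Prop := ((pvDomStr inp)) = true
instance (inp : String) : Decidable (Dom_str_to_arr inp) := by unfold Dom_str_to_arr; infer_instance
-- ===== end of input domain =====

-- B replaces A's single enumerate-loop with an incrementing row counter and per-cell appends
-- by 15 fixed slices inp[15*k:15*k+15], one comprehension per row: simpler, no mutable state.

-- ===== PORT A =====
-- A's loop body, kept as a named step function: row bump on i % 15 == 0, then out[row].append(...)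
def pvStepA (st : List (List (Option String)) × Int) (p : Int × Char) :
    List (List (Option String)) × Int :=
  let row : Int := if p.1 > 0 ∧ PySem.Int.mod p.1 15 = 0 then st.2 + 1 else st.2
  (PySem.List.pySetD st.1 row
    (PySem.List.pyGetD st.1 row [] ++
      [if p.2 == '.' then none else some (String.singleton p.2)]), row)

def str_to_arr (inp : String) : List (List (Option String)) :=
  (((PySem.List.enumerate inp.toList).foldl pvStepA
      ((List.range 15).map (fun _ => ([] : List (Option String))), 0))).1

-- ===== PORT B =====
def str_to_arr_alt (inp : String) : List (List (Option String)) :=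
  (PySem.List.pyRange 0 15 1).map (fun k =>
    (PySem.List.slice inp.toList (some (15 * k)) (some (15 * k + 15))).map
      (fun c => if c == '.' then none else some (String.singleton c)))

-- ===== PRECONDITION & SPEC =====
-- Pre_ excludes strings longer than 225 characters: there A's out[row] hits row = 15 and raises IndexError.
def Pre_str_to_arr (inp : String) : Prop := inp.toList.length ≤ 225
instance (inp : String) : Decidable (Pre_str_to_arr inp) := by unfold Pre_str_to_arr; infer_instance

def pvWitness_str_to_arr : String := "HELLO.WORLD"

def Spec_str_to_arr (inp : String) (out : List (List (Option String))) : Prop := out = str_to_arr_alt inp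
instance (inp : String) (out : List (List (Option String))) : Decidable (Spec_str_to_arr inp out) := by unfold Spec_str_to_arr; infer_instance

-- ===== CLAIM (what is proved, stated in full; the proofs are below) =====
def Claim_equal_str_to_arr : Prop := ∀ (inp : String), Dom_str_to_arr inp → Pre_str_to_arr inp → Spec_str_to_arr inp (str_to_arr inp)

-- ===== LEMMAS AND PROOFS =====

def pvCell (c : Char) : Option String := if c == '.' then none else some (String.singleton c)

def pvBoard (l : List Char) : List (List (Option String)) :=
  (List.range 15).map (fun k => ((l.drop (15 * k)).take 15).map pvCell)

lemma pvChunk (l : List Char) (c : Char) (j : Nat) (hj : j < 15) :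
    ((l ++ [c]).drop (15 * j)).take 15 =
      if j = l.length / 15 then ((l.drop (15 * j)).take 15) ++ [c]
      else (l.drop (15 * j)).take 15 := by
  have hd : ∀ (x : List Char), 15 * j ≤ l.length → ((l ++ x).drop (15 * j)) = l.drop (15 * j) ++ x :=
    fun x hx => List.drop_append_of_le_length hx
  split_ifs with h
  · subst h
    have h1 : 15 * (l.length / 15) ≤ l.length := Nat.mul_div_le l.length 15
    have h2 : l.length - 15 * (l.length / 15) ≤ 14 := by omega
    rw [hd [c] h1]
    rw [List.take_of_length_le (by simp; omega), List.take_of_length_le (by simp; omega)]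
  · rcases Nat.lt_or_ge (15 * j) (l.length + 1) with hlt | hge
    · -- j < l.length / 15 : the chunk is already full
      have hfull : 15 * j + 15 ≤ l.length := by omega
      rw [hd [c] (by omega), List.take_append_of_le_length (by simp; omega)]
    · -- j > l.length / 15 : both chunks are empty
      rw [List.drop_eq_nil_of_le (by simp; omega), List.drop_eq_nil_of_le (by omega)]

lemma pvBoard_nil : pvBoard [] = (List.range 15).map (fun _ => ([] : List (Option String))) := by
  simp [pvBoard]

lemma pvLoop (l : List Char) (h : l.length ≤ 225) :
    (PySem.List.enumerate l).foldl pvStepA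
        ((List.range 15).map (fun _ => ([] : List (Option String))), 0) =
      (pvBoard l, (((l.length - 1) / 15 : Nat) : Int)) := by
  induction l using List.reverseRecOn with
  | nil => simp [PySem.List.enumerate, pvBoard_nil]
  | append_singleton l c ih =>
    have hn : l.length ≤ 224 := by simp at h; omega
    rw [PySem.List.enumerate_append, List.foldl_append, ih (by omega)]
    have hsingle : PySem.List.enumerate [c] ((0 : Int) + l.length) = [((l.length : Int), c)] := by
      simp [PySem.List.enumerate]
    rw [hsingle]
    simp only [List.foldl_cons, List.foldl_nil]
    unfold pvStepA
    have hrow : (if (l.length : Int) > 0 ∧ PySem.Int.mod (l.length : Int) 15 = 0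
        then (((l.length - 1) / 15 : Nat) : Int) + 1 else (((l.length - 1) / 15 : Nat) : Int))
        = ((l.length / 15 : Nat) : Int) := by
      have hm : PySem.Int.mod (l.length : Int) 15 = (((l.length % 15 : Nat)) : Int) := by
        exact_mod_cast PySem.Int.mod_natCast l.length 15
      rw [hm]
      split_ifs with hc <;> omega
    simp only [hrow]
    have hR15 : l.length / 15 < 15 := by omega
    rw [PySem.List.pySetD_natCast, PySem.List.pyGetD_natCast]
    have hlen : (pvBoard l).length = 15 := by simp [pvBoard]
    have hlen' : ((l ++ [c]).length - 1) / 15 = l.length / 15 := by simp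
    rw [hlen']
    congr 1
    apply List.ext_getElem
    · simp [pvBoard]
    · intro j hj1 hj2
      have hj : j < 15 := by simpa [pvBoard] using hj2
      have hget : ∀ (m : List Char) (hjm : j < (pvBoard m).length),
          (pvBoard m)[j] = ((m.drop (15 * j)).take 15).map pvCell := by
        intro m hjm; simp [pvBoard]
      have hjl : j < (pvBoard l).length := by omega
      rw [List.getElem_set, hget (l ++ [c]) hj2, pvChunk l c j hj]
      by_cases hcase : l.length / 15 = j
      · rw [if_pos hcase, if_pos (show j = l.length / 15 from hcase.symm), List.map_append,
          List.getD_eq_getElem _ _ (by omega : l.length / 15 < (pvBoard l).length)]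
        simp only [hcase]
        rw [hget l hjl]
        rfl
      · rw [if_neg hcase, if_neg (show ¬ j = l.length / 15 from fun hx => hcase hx.symm),
          hget l hjl]

lemma pvAltEq (inp : String) : str_to_arr_alt inp = pvBoard inp.toList := by
  unfold str_to_arr_alt pvBoard
  rw [show (15 : Int) = ((15 : Nat) : Int) from rfl, PySem.List.pyRange_zero_natCast, List.map_map]
  apply List.map_congr_left
  intro k _
  simp only [Function.comp]
  rw [show ((15 : Nat) : Int) * ((k : Nat) : Int) = ((15 * k : Nat) : Int) by push_cast; ring,
    PySem.List.slice_natCast_add]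
  rfl

-- ===== VERDICT (by name: the statement is the Claim_ definition above) =====
theorem str_to_arr_spec : Claim_equal_str_to_arr := by
  intro inp _ hpre
  unfold Spec_str_to_arr str_to_arr
  rw [pvLoop inp.toList hpre, pvAltEq]
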